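-- pv_equiv track=rewrite | github.com/JOSUEPORTALES/Redes-Neuronales-Python | 03 Enfoque_Logica/07 Tratamiento Lógico del  Lenguaje/000 Gramáticas Jerarquía de Chomsky.py | es_cadena_valida_libre_contexto
-- ===== SOURCE A (Python) =====
-- def es_cadena_valida_libre_contexto(cadena):
--     contador = 0
--     for simbolo in cadena:
--         if simbolo == 'a':
--             contador += 1
--         elif simbolo == 'b':
--             contador -= 1
--         else:
--             return False  # solo se permiten 'a' y 'b'
--         if contador < 0:
--             return False  # más 'b' que 'a', no balanceado
--     return contador == 0  # solo es valido si se balancea exactamente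
-- ===== SOURCE B (Python) =====
-- def es_cadena_valida_libre_contexto(cadena):
--     for ch in cadena:
--         if ch != 'a' and ch != 'b':
--             return False
--     s = cadena
--     t = s.replace('ab', '')
--     while t != s:
--         s = t
--         t = s.replace('ab', '')
--     return s == ''
-- ===== Notes on version B (the rewrite author's own statement) =====
-- stated objective: alternative
-- what changed: replaces the running-counter scan by a rewriting strategy: after rejecting any character other than 'a'/'b', repeatedly delete 'ab' pairs via s.replace('ab','') until a fixpoint and test whether the fixpoint is empty
import Mathlib
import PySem

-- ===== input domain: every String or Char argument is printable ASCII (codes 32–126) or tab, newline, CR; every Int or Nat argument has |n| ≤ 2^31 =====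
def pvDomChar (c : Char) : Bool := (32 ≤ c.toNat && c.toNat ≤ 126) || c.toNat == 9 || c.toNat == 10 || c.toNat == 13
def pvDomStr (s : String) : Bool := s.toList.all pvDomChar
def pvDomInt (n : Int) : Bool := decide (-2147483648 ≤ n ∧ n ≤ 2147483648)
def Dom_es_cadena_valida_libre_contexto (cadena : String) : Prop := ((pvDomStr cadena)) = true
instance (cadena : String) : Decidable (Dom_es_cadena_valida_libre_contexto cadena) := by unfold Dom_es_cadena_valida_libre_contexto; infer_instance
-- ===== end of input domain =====

-- B replaces A's running-counter scan by a rewriting strategy (delete 'ab' pairs to a fixpoint): alternative decomposition, not faster.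

-- ===== PORT A =====
-- the for-loop of A: counter updated per symbol, early False on a foreign symbol or a negative counter
def pvGoA : List Char → Int → Bool
  | [], contador => contador == 0
  | simbolo :: rest, contador =>
    if simbolo = 'a' then
      (if contador + 1 < 0 then false else pvGoA rest (contador + 1))
    else if simbolo = 'b' then
      (if contador - 1 < 0 then false else pvGoA rest (contador - 1))
    else false

def es_cadena_valida_libre_contexto (cadena : String) : Bool :=
  pvGoA cadena.toList 0

-- ===== PORT B =====
-- the while-loop of B: replace 'ab' by '' until the string no longer changes (fuel only makes the
-- recursion total; each productive step strictly shortens the string, so length+1 steps reach the fixpoint)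
def pvLoopB : Nat → String → String
  | 0, s => s
  | f + 1, s =>
    let t := PySem.Str.replace s "ab" ""
    if t = s then s else pvLoopB f t

def es_cadena_valida_libre_contexto_alt (cadena : String) : Bool :=
  if cadena.toList.all (fun ch => ch == 'a' || ch == 'b') then
    pvLoopB (cadena.toList.length + 1) cadena == ""
  else
    false

-- ===== PRECONDITION & SPEC =====
def Spec_es_cadena_valida_libre_contexto (cadena : String) (out : Bool) : Prop := out = es_cadena_valida_libre_contexto_alt cadena
instance (cadena : String) (out : Bool) : Decidable (Spec_es_cadena_valida_libre_contexto cadena out) := by unfold Spec_es_cadena_valida_libre_contexto; infer_instance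

-- ===== CLAIM (what is proved, stated in full; the proofs are below) =====
def Claim_equal_es_cadena_valida_libre_contexto : Prop := ∀ (cadena : String), Dom_es_cadena_valida_libre_contexto cadena → Spec_es_cadena_valida_libre_contexto cadena (es_cadena_valida_libre_contexto cadena)

-- ===== LEMMAS AND PROOFS =====
def pvR : List Char → List Char
  | [] => []
  | c :: t =>
    if c = 'a' ∧ t.head? = some 'b' then pvR t.tail else c :: pvR t
termination_by l => l.length
decreasing_by
  · simp [List.length_tail]
  · simp

theorem pvR_ab (t : List Char) : pvR ('a' :: 'b' :: t) = pvR t := by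
  rw [pvR]; simp

theorem pvR_cons (c : Char) (t : List Char) (h : ¬ (c = 'a' ∧ t.head? = some 'b')) :
    pvR (c :: t) = c :: pvR t := by
  rw [pvR]; simp [h]

theorem pvGo_eq (fuel : Nat) : ∀ (l acc : List Char), l.length ≤ fuel →
    PySem.Chars.replace.go ['a','b'] [] fuel l acc = acc.reverse ++ pvR l := by
  induction fuel with
  | zero =>
    intro l acc h
    have : l = [] := List.eq_nil_of_length_eq_zero (Nat.le_zero.mp h)
    subst this
    simp [PySem.Chars.replace.go, pvR]
  | succ f ih =>
    intro l acc h
    match l with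
    | [] => simp [PySem.Chars.replace.go, pvR]
    | c :: t =>
      rw [PySem.Chars.replace.go]
      by_cases hp : List.isPrefixOf (['a','b'] : List Char) (c :: t) = true
      · obtain ⟨rest, hrest⟩ := (List.isPrefixOf_iff_prefix.mp hp)
        simp only [List.cons_append, List.nil_append, List.cons.injEq] at hrest
        obtain ⟨hc, hrest⟩ := hrest
        match t, hrest.symm with
        | _, rfl =>
          subst hc
          simp only [hp, if_pos, List.length_cons, List.drop_succ_cons,
            List.length_nil, List.reverse_nil, List.nil_append, List.drop]
          have hlen : rest.length ≤ f := by simp at h; omega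
          rw [ih _ _ hlen, pvR_ab]
      · simp only [hp, Bool.false_eq_true, if_neg, not_false_iff]
        have hlen : t.length ≤ f := by simp at h; omega
        rw [ih _ _ hlen, pvR_cons]
        · simp
        · rintro ⟨hc, ht⟩
          apply hp
          subst hc
          match t, ht with
          | _ :: t', ht =>
            simp at ht
            subst ht
            simp [List.isPrefixOf]

theorem pvReplace_eq (l : List Char) :
    PySem.Chars.replace l ['a','b'] [] = pvR l := by
  rw [PySem.Chars.replace]
  simp only [List.isEmpty_cons, Bool.false_eq_true, if_neg, not_false_iff]
  simpa using pvGo_eq l.length l [] le_rfl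

theorem pvR_sublist (l : List Char) : (pvR l).Sublist l := by
  induction l using pvR.induct with
  | case1 => simp [pvR]
  | case2 c t h ih =>
    obtain ⟨hc, ht⟩ := h
    match t, ht with
    | _ :: t', ht =>
      simp at ht; subst ht; subst hc
      rw [pvR_ab]
      simp at ih
      exact ih.trans (by simp)
  | case3 c t h ih =>
    rw [pvR_cons c t h]
    exact ih.cons₂ c

theorem pvR_len_lt (l : List Char) (h : pvR l ≠ l) : (pvR l).length < l.length := by
  have hle := (pvR_sublist l).length_le
  rcases lt_or_eq_of_le hle with h1 | h1
  · exact h1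
  · exact absurd ((pvR_sublist l).eq_of_length h1) h

theorem pvGoA_R (l : List Char) : ∀ (c : Int), 0 ≤ c → pvGoA (pvR l) c = pvGoA l c := by
  induction l using pvR.induct with
  | case1 => intro c hc; simp [pvR]
  | case2 c t h ih =>
    obtain ⟨hc, ht⟩ := h
    match t, ht with
    | _ :: t', ht =>
      simp at ht; subst ht; subst hc
      intro c hc0
      rw [pvR_ab]
      have h1 : ¬ (c + 1 < 0) := by omega
      have h2 : ¬ (c + 1 - 1 < 0) := by omega
      simp only [pvGoA, if_pos rfl, h1, if_neg, if_false]
      have : ('b' : Char) ≠ 'a' := by decide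
      simp only [this, if_neg, if_pos rfl, h2, if_false]
      rw [show c + 1 - 1 = c by omega]
      simp at ih
      exact ih c hc0
  | case3 x t h ih =>
    intro c hc0
    rw [pvR_cons x t h]
    by_cases hx : x = 'a'
    · subst hx
      have h1 : ¬ (c + 1 < 0) := by omega
      simp only [pvGoA, if_pos rfl, h1, if_neg, if_false]
      exact ih (c+1) (by omega)
    · by_cases hb : x = 'b'
      · subst hb
        by_cases h2 : c - 1 < 0
        · simp [pvGoA, h2]
        · simp only [pvGoA, hx, if_neg, h2, if_false]
          exact ih (c-1) (by omega)
      · simp [pvGoA, hx, hb]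

def pvLoopL : Nat → List Char → List Char
  | 0, l => l
  | f + 1, l =>
    let t := pvR l
    if t = l then l else pvLoopL f t

theorem pvLoopB_toList (f : Nat) : ∀ (s : String), (pvLoopB f s).toList = pvLoopL f s.toList := by
  induction f with
  | zero => intro s; simp [pvLoopB, pvLoopL]
  | succ f ih =>
    intro s
    simp only [pvLoopB, pvLoopL]
    have hrep : (PySem.Str.replace s "ab" "").toList = pvR s.toList := by
      rw [PySem.Str.toList_replace]
      exact pvReplace_eq s.toList
    by_cases h : PySem.Str.replace s "ab" "" = s
    · rw [if_pos h, if_pos (by rw [← hrep, h])]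
    · rw [if_neg h, if_neg (by rw [← hrep]; intro he; exact h (String.toList_inj.mp he)), ih, hrep]

theorem pvLoopL_goA (f : Nat) : ∀ (l : List Char), pvGoA (pvLoopL f l) 0 = pvGoA l 0 := by
  induction f with
  | zero => intro l; simp [pvLoopL]
  | succ f ih =>
    intro l
    rw [pvLoopL]
    by_cases h : pvR l = l
    · rw [if_pos h]
    · rw [if_neg h, ih, pvGoA_R l 0 le_rfl]

theorem pvLoopL_fix (f : Nat) : ∀ (l : List Char), l.length < f → pvR (pvLoopL f l) = pvLoopL f l := by
  induction f with
  | zero => intro l h; omega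
  | succ f ih =>
    intro l h
    rw [pvLoopL]
    by_cases hfx : pvR l = l
    · rw [if_pos hfx]; exact hfx
    · rw [if_neg hfx]
      exact ih _ (by have := pvR_len_lt l hfx; omega)

theorem pvLoopL_sublist (f : Nat) : ∀ (l : List Char), (pvLoopL f l).Sublist l := by
  induction f with
  | zero => intro l; simp [pvLoopL]
  | succ f ih =>
    intro l
    rw [pvLoopL]
    by_cases h : pvR l = l
    · rw [if_pos h]
    · rw [if_neg h]
      exact (ih _).trans (pvR_sublist l)

theorem pvFix_shape (l : List Char) (hfix : pvR l = l)
    (hab : ∀ ch ∈ l, ch = 'a' ∨ ch = 'b') :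
    ∃ i j, l = List.replicate i 'b' ++ List.replicate j 'a' := by
  induction l using pvR.induct with
  | case1 => exact ⟨0, 0, rfl⟩
  | case2 c t h ih =>
    obtain ⟨hc, ht⟩ := h
    match t, ht with
    | _ :: t', ht =>
      simp at ht; subst ht; subst hc
      exfalso
      rw [pvR_ab] at hfix
      have h1 := (pvR_sublist t').length_le
      have h2 := congrArg List.length hfix
      simp at h2
      omega
  | case3 x t h ih =>
    rw [pvR_cons x t h] at hfix
    have hfix' : pvR t = t := by injection hfix
    have hab' : ∀ ch ∈ t, ch = 'a' ∨ ch = 'b' := fun ch hm => hab ch (List.mem_cons_of_mem _ hm)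
    obtain ⟨i, j, hij⟩ := ih hfix' hab'
    rcases hab x (List.mem_cons_self ..) with hx | hx
    · subst hx
      -- x = 'a' and ¬('a' = 'a' ∧ t.head? = 'b') so t.head? ≠ 'b', so i = 0
      have hhd : t.head? ≠ some 'b' := fun hh => h ⟨rfl, hh⟩
      have hi : i = 0 := by
        by_contra hi0
        apply hhd
        rw [hij]
        match i, hi0 with
        | i+1, _ => simp [List.replicate_succ]
      subst hi
      exact ⟨0, j + 1, by simp [hij, List.replicate_succ]⟩
    · subst hx
      exact ⟨i + 1, j, by simp [hij, List.replicate_succ]⟩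

theorem pvGoA_allA (t : List Char) : ∀ (c : Int), (∀ ch ∈ t, ch = 'a') → 1 ≤ c →
    pvGoA t c = false := by
  induction t with
  | nil => intro c _ hc; simp [pvGoA]; omega
  | cons x t ih =>
    intro c ht hc
    have hx : x = 'a' := ht x (List.mem_cons_self ..)
    subst hx
    have h1 : ¬ (c + 1 < 0) := by omega
    simp only [pvGoA, if_pos rfl, h1, if_neg, if_false]
    exact ih (c+1) (fun ch hm => ht ch (List.mem_cons_of_mem _ hm)) (by omega)

theorem pvGoA_foreign (l : List Char) : ∀ (c : Int), (∃ ch ∈ l, ch ≠ 'a' ∧ ch ≠ 'b') →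
    pvGoA l c = false := by
  induction l with
  | nil => rintro c ⟨ch, hm, _⟩; simp at hm
  | cons x t ih =>
    rintro c ⟨ch, hm, hne⟩
    rcases List.mem_cons.mp hm with rfl | hm'
    · simp [pvGoA, hne.1, hne.2]
    · by_cases hx : x = 'a'
      · subst hx
        by_cases h1 : c + 1 < 0
        · simp [pvGoA, h1]
        · simp only [pvGoA, if_pos rfl, h1, if_neg, if_false]
          exact ih (c+1) ⟨ch, hm', hne⟩
      · by_cases hb : x = 'b'
        · subst hb
          by_cases h2 : c - 1 < 0
          · simp [pvGoA, h2]
          · simp only [pvGoA, hx, if_neg, h2, if_false]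
            exact ih (c-1) ⟨ch, hm', hne⟩
        · simp [pvGoA, hx, hb]

theorem pvGoA_shape (i j : Nat) :
    pvGoA (List.replicate i 'b' ++ List.replicate j 'a') 0
      = ((List.replicate i 'b' ++ List.replicate j 'a' : List Char) == []) := by
  match i with
  | i + 1 =>
    have hba : ('b' : Char) ≠ 'a' := by decide
    have h2 : ((0:Int) - 1 < 0) := by omega
    simp [List.replicate_succ, pvGoA, hba]
  | 0 =>
    simp only [List.replicate_zero, List.nil_append]
    match j with
    | 0 => simp [pvGoA]
    | j + 1 =>
      have h1 : ¬ ((0:Int) + 1 < 0) := by omega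
      simp [List.replicate_succ, pvGoA,
        pvGoA_allA (List.replicate j 'a') 1 (by simp) (by omega)]

-- ===== VERDICT (by name: the statement is the Claim_ definition above) =====
theorem es_cadena_valida_libre_contexto_spec : Claim_equal_es_cadena_valida_libre_contexto := by
  intro cadena _
  unfold Spec_es_cadena_valida_libre_contexto

  unfold es_cadena_valida_libre_contexto es_cadena_valida_libre_contexto_alt
  by_cases hab : cadena.toList.all (fun ch => ch == 'a' || ch == 'b') = true
  · rw [if_pos hab]
    have hF := pvLoopB_toList (cadena.toList.length + 1) cadena
    have hfix := pvLoopL_fix (cadena.toList.length + 1) cadena.toList (by omega)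
    have hsub := pvLoopL_sublist (cadena.toList.length + 1) cadena.toList
    have habF : ∀ ch ∈ pvLoopL (cadena.toList.length + 1) cadena.toList, ch = 'a' ∨ ch = 'b' := by
      intro ch hm
      have := List.all_eq_true.mp hab ch (hsub.mem hm)
      simpa using this
    obtain ⟨i, j, hij⟩ := pvFix_shape _ hfix habF
    rw [← pvLoopL_goA (cadena.toList.length + 1) cadena.toList, hij, pvGoA_shape]
    have hlist : (pvLoopB (cadena.toList.length + 1) cadena).toList
        = List.replicate i 'b' ++ List.replicate j 'a' := by rw [hF, hij]
    have hiff : (pvLoopB (cadena.toList.length + 1) cadena = "")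
        ↔ (List.replicate i 'b' ++ List.replicate j 'a' = ([] : List Char)) := by
      rw [← hlist]
      constructor
      · intro h; rw [h]; rfl
      · intro h; exact String.toList_inj.mp (by rw [h]; rfl)
    by_cases hnil : List.replicate i 'b' ++ List.replicate j 'a' = ([] : List Char)
    · have h1 : pvLoopB (cadena.toList.length + 1) cadena = "" := hiff.mpr hnil
      simp only [String.length_toList] at h1
      simp [hnil, h1]
    · have hs : pvLoopB (cadena.toList.length + 1) cadena ≠ "" := fun h => hnil (hiff.mp h)
      simp only [String.length_toList] at hs
      simp [hnil, beq_eq_false_iff_ne.mpr hs]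
  · rw [if_neg hab]
    obtain ⟨ch, hm, hch⟩ := List.all_eq_false.mp (Bool.eq_false_iff.mpr hab)
    apply pvGoA_foreign
    exact ⟨ch, hm, by simpa using hch⟩
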